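-- pv_equiv track=rewrite | github.com/MaximeBerolo/Jeu_de_tong | GUI.py | BorderOfRectangle
-- ===== SOURCE A (Python) =====
-- from operator import itemgetter
--
-- def BorderOfRectangle(size):
--     lst = []
--
--     for j in range(1,size-1):
--         lst.append([1, j+1])
--         lst.append([size, j+1])
--         lst.append([j+1, 1])
--         lst.append([j+1, size])
--
--     lst = sorted(lst, key=itemgetter(0))
--
--     return lst
-- ===== SOURCE B (Python) =====
-- def BorderOfRectangle(size):
--     # Build the border already ordered by row: row 1 first, then the middle
--     # rows (each contributing its left and right cell), then row `size`.
--     # No sort needed.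
--     if size < 3:
--         return []
--     top = [[1, j] for j in range(2, size)]
--     mid = [cell for k in range(2, size) for cell in ([k, 1], [k, size])]
--     bot = [[size, j] for j in range(2, size)]
--     return top + mid + bot
-- ===== Notes on version B (the rewrite author's own statement) =====
-- stated objective: faster
-- what changed: B emits the border cells directly in row-sorted order (top row, then each middle row's left/right cells, then bottom row), eliminating A's sorted() call entirely.
import Mathlib
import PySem

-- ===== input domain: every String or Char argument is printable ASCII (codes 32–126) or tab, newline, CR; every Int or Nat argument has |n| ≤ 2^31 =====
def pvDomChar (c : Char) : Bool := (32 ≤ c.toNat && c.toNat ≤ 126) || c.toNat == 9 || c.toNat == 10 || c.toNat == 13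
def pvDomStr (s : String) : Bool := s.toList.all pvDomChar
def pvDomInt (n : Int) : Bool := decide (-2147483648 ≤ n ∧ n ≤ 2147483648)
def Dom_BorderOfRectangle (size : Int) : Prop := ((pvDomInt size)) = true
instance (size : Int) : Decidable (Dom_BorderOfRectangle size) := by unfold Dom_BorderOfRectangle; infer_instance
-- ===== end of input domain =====

-- B builds the border already ordered by row (top row, middle rows, bottom row), removing A's sort; same return value.

-- ===== PORT A =====
def BorderOfRectangle (size : Int) : List (List Int) :=
  let lst : List (List Int) :=
    (PySem.List.pyRange 1 (size - 1) 1).foldl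
      (fun lst j => lst ++ [[1, j + 1], [size, j + 1], [j + 1, 1], [j + 1, size]]) []
  -- key=itemgetter(0): every element of lst is a 2-list, so `headD 0` is exact here
  PySem.List.sorted lst (fun l => l.headD 0) false

-- ===== PORT B =====
def BorderOfRectangle_alt (size : Int) : List (List Int) :=
  if size < 3 then []
  else
    ((PySem.List.pyRange 2 size 1).map (fun j => [1, j]))
      ++ ((PySem.List.pyRange 2 size 1).flatMap (fun k => [[k, 1], [k, size]]))
      ++ ((PySem.List.pyRange 2 size 1).map (fun j => [size, j]))

-- ===== PRECONDITION & SPEC =====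
def Spec_BorderOfRectangle (size : Int) (out : List (List Int)) : Prop := out = BorderOfRectangle_alt size
instance (size : Int) (out : List (List Int)) : Decidable (Spec_BorderOfRectangle size out) := by unfold Spec_BorderOfRectangle; infer_instance

-- ===== CLAIM (what is proved, stated in full; the proofs are below) =====
def Claim_equal_BorderOfRectangle : Prop := ∀ (size : Int), Dom_BorderOfRectangle size → Spec_BorderOfRectangle size (BorderOfRectangle size)

-- ===== LEMMAS AND PROOFS =====

-- the three blocks of B, truncated after t middle rows (proof-only helpers)
def pvTop (t : Nat) : List (List Int) :=
  (PySem.List.pyRange 2 (2 + (t : Int)) 1).map (fun j => [1, j])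
def pvMid (n : Int) (t : Nat) : List (List Int) :=
  (PySem.List.pyRange 2 (2 + (t : Int)) 1).flatMap (fun k => [[k, 1], [k, n]])
def pvBot (n : Int) (t : Nat) : List (List Int) :=
  (PySem.List.pyRange 2 (2 + (t : Int)) 1).map (fun j => [n, j])

theorem pvInsertBetween {α : Type} (before : α → α → Bool) (x : α) (P Q : List α)
    (hP : ∀ y ∈ P, before x y = false)
    (hQ : ∀ q, Q.head? = some q → before x q = true) :
    PySem.List.insertBy before x (P ++ Q) = P ++ x :: Q := by
  induction P with
  | nil =>
      cases Q with
      | nil => simp [PySem.List.insertBy]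
      | cons q Q' => simp [PySem.List.insertBy, hQ q rfl]
  | cons p P' ih =>
      have hp : before x p = false := hP p (by simp)
      simp only [List.cons_append, PySem.List.insertBy, hp]
      simp [ih (fun y hy => hP y (by simp [hy]))]

theorem pvTop_key {t : Nat} {y : List Int} (h : y ∈ pvTop t) : y.head?.getD 0 = 1 := by
  simp only [pvTop, List.mem_map] at h
  obtain ⟨j, _, rfl⟩ := h; rfl

theorem pvMid_key {n : Int} {t : Nat} {y : List Int} (h : y ∈ pvMid n t) :
    2 ≤ y.head?.getD 0 ∧ y.head?.getD 0 ≤ (t : Int) + 1 := by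
  simp only [pvMid, List.mem_flatMap, PySem.List.mem_pyRange_one, List.mem_cons,
    List.not_mem_nil, or_false] at h
  obtain ⟨k, hk, h2⟩ := h
  rcases h2 with rfl | rfl <;> simp <;> omega

theorem pvBot_key {n : Int} {t : Nat} {y : List Int} (h : y ∈ pvBot n t) : y.head?.getD 0 = n := by
  simp only [pvBot, List.mem_map] at h
  obtain ⟨j, _, rfl⟩ := h; rfl

theorem pvTop_succ (t : Nat) : pvTop (t + 1) = pvTop t ++ [[1, 2 + (t : Int)]] := by
  have h : (2 : Int) + ((t : Int) + 1) = (2 + (t : Int)) + 1 := by ring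
  simp only [pvTop, Nat.cast_add, Nat.cast_one, h,
    PySem.List.pyRange_one_succ_right (by omega : (2 : Int) ≤ 2 + (t : Int)), List.map_append]
  rfl

theorem pvMid_succ (n : Int) (t : Nat) :
    pvMid n (t + 1) = pvMid n t ++ [[2 + (t : Int), 1], [2 + (t : Int), n]] := by
  have h : (2 : Int) + ((t : Int) + 1) = (2 + (t : Int)) + 1 := by ring
  simp only [pvMid, Nat.cast_add, Nat.cast_one, h,
    PySem.List.pyRange_one_succ_right (by omega : (2 : Int) ≤ 2 + (t : Int)), List.flatMap_append]
  rfl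

theorem pvBot_succ (n : Int) (t : Nat) :
    pvBot n (t + 1) = pvBot n t ++ [[n, 2 + (t : Int)]] := by
  have h : (2 : Int) + ((t : Int) + 1) = (2 + (t : Int)) + 1 := by ring
  simp only [pvBot, Nat.cast_add, Nat.cast_one, h,
    PySem.List.pyRange_one_succ_right (by omega : (2 : Int) ≤ 2 + (t : Int)), List.map_append]
  rfl

-- the insertion-sort fold over the first t loop iterations yields B's three blocks
theorem pvFold (n : Int) : ∀ (t : Nat), (t : Int) + 1 < n →
    List.foldl
      (fun acc x => PySem.List.insertBy
        (fun a b => decide ((a.headD 0 : Int) < (b.headD 0 : Int))) x acc) []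
      ((PySem.List.pyRange 1 (1 + (t : Int)) 1).flatMap
        (fun j => [[1, j + 1], [n, j + 1], [j + 1, 1], [j + 1, n]]))
    = pvTop t ++ pvMid n t ++ pvBot n t := by
  intro t
  induction t with
  | zero =>
      intro _
      simp [PySem.List.pyRange_one_eq_nil (by omega : (1 : Int) ≤ 1),
        PySem.List.pyRange_one_eq_nil (by omega : (2 : Int) ≤ 2), pvTop, pvMid, pvBot]
  | succ t ih =>
      intro h
      have hc : (t : Int) + 1 < n := by push_cast at h ⊢; omega
      have hrange : PySem.List.pyRange 1 (1 + ((t : Nat) + 1 : Nat) : Int) 1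
          = PySem.List.pyRange 1 (1 + (t : Int)) 1 ++ [1 + (t : Int)] := by
        have e : (1 : Int) + (((t : Nat) + 1 : Nat) : Int) = (1 + (t : Int)) + 1 := by push_cast; ring
        rw [e, PySem.List.pyRange_one_succ_right (by omega : (1 : Int) ≤ 1 + (t : Int))]
      rw [hrange, List.flatMap_append, List.foldl_append, ih hc]
      have e2 : (1 + (t : Int)) + 1 = 2 + (t : Int) := by ring
      simp only [List.flatMap_cons, List.flatMap_nil, List.append_nil, e2, List.foldl_cons,
        List.foldl_nil]
      have htlt : (t : Int) + 2 < n := by push_cast at h; omega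
      -- insert [1, 2+t] at the end of the top block
      have s1 : PySem.List.insertBy
          (fun a b => decide ((a.headD 0 : Int) < (b.headD 0 : Int))) [1, 2 + (t : Int)]
          (pvTop t ++ pvMid n t ++ pvBot n t)
          = (pvTop t ++ [[1, 2 + (t : Int)]]) ++ (pvMid n t ++ pvBot n t) := by
        rw [List.append_assoc]
        rw [pvInsertBetween _ _ (pvTop t) (pvMid n t ++ pvBot n t)
          (fun y hy => by simp [pvTop_key hy])
          (fun q hq => by
            have hmem := List.mem_of_mem_head? (by rw [hq]; rfl)
            rcases List.mem_append.mp hmem with hm | hm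
            · have := pvMid_key hm; simp; omega
            · have := pvBot_key hm; simp [this]; omega)]
        simp
      rw [s1]
      -- insert [n, 2+t] at the very end
      have s2 : PySem.List.insertBy
          (fun a b => decide ((a.headD 0 : Int) < (b.headD 0 : Int))) [n, 2 + (t : Int)]
          ((pvTop t ++ [[1, 2 + (t : Int)]]) ++ (pvMid n t ++ pvBot n t))
          = (pvTop t ++ [[1, 2 + (t : Int)]]) ++ (pvMid n t ++ pvBot n t) ++ [[n, 2 + (t : Int)]] := by
        apply PySem.List.insertBy_of_forall_not_before
        intro y hy
        simp only [List.mem_append] at hy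
        rcases hy with (hm | hm) | (hm | hm)
        · have := pvTop_key hm; simp [this]; omega
        · simp at hm; subst hm; simp; omega
        · have := pvMid_key hm; simp; omega
        · have := pvBot_key hm; simp [this]
      rw [s2]
      -- insert [2+t, 1] between the middle and bottom blocks
      have s3 : PySem.List.insertBy
          (fun a b => decide ((a.headD 0 : Int) < (b.headD 0 : Int))) [2 + (t : Int), 1]
          ((pvTop t ++ [[1, 2 + (t : Int)]]) ++ (pvMid n t ++ pvBot n t) ++ [[n, 2 + (t : Int)]])
          = ((pvTop t ++ [[1, 2 + (t : Int)]]) ++ pvMid n t)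
            ++ [2 + (t : Int), 1] :: (pvBot n t ++ [[n, 2 + (t : Int)]]) := by
        have hre : (pvTop t ++ [[1, 2 + (t : Int)]]) ++ (pvMid n t ++ pvBot n t) ++ [[n, 2 + (t : Int)]]
            = ((pvTop t ++ [[1, 2 + (t : Int)]]) ++ pvMid n t)
              ++ (pvBot n t ++ [[n, 2 + (t : Int)]]) := by simp [List.append_assoc]
        rw [hre]
        apply pvInsertBetween
        · intro y hy
          simp only [List.mem_append] at hy
          rcases hy with (hm | hm) | hm
          · have := pvTop_key hm; simp [this]; omega
          · simp at hm; subst hm; simp; omega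
          · have := pvMid_key hm; simp; omega
        · intro q hq
          have hmem := List.mem_of_mem_head? (by rw [hq]; rfl)
          rcases List.mem_append.mp hmem with hm | hm
          · have := pvBot_key hm; simp [this]; omega
          · simp at hm; subst hm; simp; omega
      rw [s3]
      -- insert [2+t, n] right after [2+t, 1]
      have s4 : PySem.List.insertBy
          (fun a b => decide ((a.headD 0 : Int) < (b.headD 0 : Int))) [2 + (t : Int), n]
          (((pvTop t ++ [[1, 2 + (t : Int)]]) ++ pvMid n t)
            ++ [2 + (t : Int), 1] :: (pvBot n t ++ [[n, 2 + (t : Int)]]))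
          = (((pvTop t ++ [[1, 2 + (t : Int)]]) ++ pvMid n t) ++ [[2 + (t : Int), 1]])
            ++ [2 + (t : Int), n] :: (pvBot n t ++ [[n, 2 + (t : Int)]]) := by
        have hre : ((pvTop t ++ [[1, 2 + (t : Int)]]) ++ pvMid n t)
              ++ [2 + (t : Int), 1] :: (pvBot n t ++ [[n, 2 + (t : Int)]])
            = (((pvTop t ++ [[1, 2 + (t : Int)]]) ++ pvMid n t) ++ [[2 + (t : Int), 1]])
              ++ (pvBot n t ++ [[n, 2 + (t : Int)]]) := by simp [List.append_assoc]
        rw [hre]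
        apply pvInsertBetween
        · intro y hy
          simp only [List.mem_append] at hy
          rcases hy with ((hm | hm) | hm) | hm
          · have := pvTop_key hm; simp [this]; omega
          · simp at hm; subst hm; simp; omega
          · have := pvMid_key hm; simp; omega
          · simp at hm; subst hm; simp
        · intro q hq
          have hmem := List.mem_of_mem_head? (by rw [hq]; rfl)
          rcases List.mem_append.mp hmem with hm | hm
          · have := pvBot_key hm; simp [this]; omega
          · simp at hm; subst hm; simp; omega
      rw [s4, pvTop_succ, pvMid_succ, pvBot_succ]
      simp [List.append_assoc]

-- ===== VERDICT (by name: the statement is the Claim_ definition above) =====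
theorem BorderOfRectangle_spec : Claim_equal_BorderOfRectangle := by
  intro n _
  unfold Spec_BorderOfRectangle BorderOfRectangle BorderOfRectangle_alt
  rw [PySem.List.foldl_append_eq_flatMap
    (fun j => [[1, j + 1], [n, j + 1], [j + 1, 1], [j + 1, n]]) _ []]
  simp only [List.nil_append]
  by_cases hn : n < 3
  · rw [if_pos hn]
    rw [PySem.List.pyRange_one_eq_nil (by omega : n - 1 ≤ 1)]
    simp [PySem.List.sorted]
  · rw [if_neg hn]
    set t : Nat := (n - 2).toNat with ht
    have htn : (t : Int) = n - 2 := Int.toNat_of_nonneg (by omega)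
    have h1 : n - 1 = 1 + (t : Int) := by omega
    have h2 : (2 : Int) + (t : Int) = n := by omega
    rw [h1, PySem.List.sorted_eq_foldl_insertBy]
    rw [pvFold n t (by omega)]
    simp only [pvTop, pvMid, pvBot, h2]
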